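-- pv_equiv track=rewrite | github.com/rolandjansky/athena | PhysicsAnalysis/PyAnalysis/PyAnalysisUtils/python/pydraw.py | _untokenize
-- ===== SOURCE A (Python) =====
-- import token
--
-- def _untokenize (tokens):
--     """Transform tokens back into Python source code.
--
--     Each element returned by the iterable must be a token sequence
--     with at least two elements, a token number and token value.
--
--     Unlike tokenize.untokenize(), this does not handle multiple lines.
--     It also tries not to add unneeded spaces.
--
--     Examples:
--     >>> from tokenize import generate_tokens, untokenize
--     >>> import six
--     >>> if six.PY2:
--     ...     from StringIO import StringIO
--     ... else:
--     ...     from io import StringIO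
--     >>> def untokenize1(tt):
--     ...   tt=list(tt)
--     ...   if tt[-1][0]==0: tt=tt[:-1]
--     ...   return untokenize(tt)
--     >>> untokenize1(generate_tokens(StringIO('1+1').readline))
--     '1+1'
--     >>> _untokenize(generate_tokens(StringIO('1+1').readline))
--     '1+1'
--     >>> untokenize1(generate_tokens(StringIO('foo$i>2*h').readline))
--     'foo$i>2*h'
--     >>> _untokenize(generate_tokens(StringIO('foo$i>2*h').readline))
--     'foo$i>2*h'
--     """
--     lastname = False
--     toks = []
--     toks_append = toks.append
--     for tok in tokens:
--         toknum, tokval = tok[:2]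
--         tokval = tokval.strip()
--         if toknum in (token.NAME, token.NUMBER):
--             if lastname:
--                 tokval = ' ' + tokval
--             lastname = True
--         else:
--             lastname = False
--         toks_append (tokval)
--     return ''.join(toks)
-- ===== SOURCE B (Python) =====
-- # token.NAME = 1, token.NUMBER = 2 (stable CPython token numbers)
-- _NAME, _NUMBER = 1, 2
--
--
-- def _untokenize(tokens):
--     """Run-grouping rebuild: split the stream into maximal runs of word
--     tokens (NAME/NUMBER); each run is rendered with ' '.join, every
--     non-word token passes through verbatim; concatenate the groups."""
--     items = [(tok[0] in (_NAME, _NUMBER), tok[1].strip()) for tok in tokens]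
--     groups = []
--     i, n = 0, len(items)
--     while i < n:
--         is_word, val = items[i]
--         if is_word:
--             j = i + 1
--             while j < n and items[j][0]:
--                 j += 1
--             groups.append(' '.join(v for _, v in items[i:j]))
--             i = j
--         else:
--             groups.append(val)
--             i += 1
--     return ''.join(groups)
-- ===== Notes on version B (the rewrite author's own statement) =====
-- stated objective: alternative
-- what changed: Replaces the stateful single loop carrying a lastname flag with a run-grouping algorithm: the stream is split into maximal runs of word tokens (NAME/NUMBER), each run is rendered with ' '.join, non-word tokens pass through verbatim, and the groups are concatenated.
import Mathlib
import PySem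

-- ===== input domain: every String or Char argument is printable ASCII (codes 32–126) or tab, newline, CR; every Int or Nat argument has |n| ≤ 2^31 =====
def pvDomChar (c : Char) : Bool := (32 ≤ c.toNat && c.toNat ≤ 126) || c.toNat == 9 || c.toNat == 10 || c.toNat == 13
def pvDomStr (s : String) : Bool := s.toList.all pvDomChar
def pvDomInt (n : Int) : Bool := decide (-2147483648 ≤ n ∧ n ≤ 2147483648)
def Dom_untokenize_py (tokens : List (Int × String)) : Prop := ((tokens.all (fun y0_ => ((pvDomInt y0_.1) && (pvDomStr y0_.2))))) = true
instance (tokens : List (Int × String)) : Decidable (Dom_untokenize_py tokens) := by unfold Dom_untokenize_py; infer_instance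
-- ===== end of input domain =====

-- B replaces A's stateful single loop (lastname flag) with a run-grouping algorithm:
-- maximal runs of word tokens are rendered with ' '.join, other tokens pass through; same cost.

-- ===== PORT A =====
-- literal port of A's loop: state = (lastname, accumulated toks); ''.join at the end
def untokenize_py (tokens : List (Int × String)) : String :=
  let st := tokens.foldl
    (fun (st : Bool × List String) tok =>
      let lastname := st.1
      let toks := st.2
      let tokval := PySem.Str.strip tok.2
      if tok.1 == 1 || tok.1 == 2 then   -- token.NAME = 1, token.NUMBER = 2
        (true, toks ++ [if lastname then String.ofList (' ' :: tokval.toList) else tokval])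
      else
        (false, toks ++ [tokval]))
    (false, [])
  PySem.Str.join "" st.2

-- ===== PORT B =====
-- B's outer while over items, the inner run-collecting while = takeWhile/dropWhile on the rest
def pvGroupsB : List (Bool × String) → List String
  | [] => []
  | (w, v) :: rest =>
    if w then
      PySem.Str.join " " (v :: (rest.takeWhile (·.1)).map (·.2))
        :: pvGroupsB (rest.dropWhile (·.1))
    else
      v :: pvGroupsB rest
  termination_by l => l.length
  decreasing_by
  · exact Nat.lt_succ_of_le (List.length_dropWhile_le _ _)
  · exact Nat.lt_succ_self _

def untokenize_py_alt (tokens : List (Int × String)) : String :=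
  let items := tokens.map (fun t => (t.1 == 1 || t.1 == 2, PySem.Str.strip t.2))
  PySem.Str.join "" (pvGroupsB items)

-- ===== PRECONDITION & SPEC =====
def Spec_untokenize_py (tokens : List (Int × String)) (out : String) : Prop := out = untokenize_py_alt tokens
instance (tokens : List (Int × String)) (out : String) : Decidable (Spec_untokenize_py tokens out) := by unfold Spec_untokenize_py; infer_instance

-- ===== CLAIM =====
def Claim_equal_untokenize_py : Prop := ∀ (tokens : List (Int × String)), Dom_untokenize_py tokens → Spec_untokenize_py tokens (untokenize_py tokens)

-- ===== LEMMAS AND PROOFS =====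

-- proof vocabulary: is-word test, stripped value, ' ' + s, the mapped item
def pvW (t : Int × String) : Bool := t.1 == 1 || t.1 == 2
def pvV (t : Int × String) : String := PySem.Str.strip t.2
def pvSp (s : String) : String := String.ofList (' ' :: s.toList)
def pvF (t : Int × String) : Bool × String := (pvW t, pvV t)

-- A's loop body, named
def pvStepA (st : Bool × List String) (tok : Int × String) : Bool × List String :=
  if tok.1 == 1 || tok.1 == 2 then
    (true, st.2 ++ [if st.1 then pvSp (PySem.Str.strip tok.2) else PySem.Str.strip tok.2])
  else
    (false, st.2 ++ [PySem.Str.strip tok.2])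

lemma stepA_def : pvStepA = (fun (st : Bool × List String) tok =>
      let lastname := st.1
      let toks := st.2
      let tokval := PySem.Str.strip tok.2
      if tok.1 == 1 || tok.1 == 2 then
        (true, toks ++ [if lastname then String.ofList (' ' :: tokval.toList) else tokval])
      else
        (false, toks ++ [tokval])) := rfl

-- the list of pieces A emits, over mapped items, parametrised by the incoming flag
def pvPieces (b : Bool) : List (Bool × String) → List String
  | [] => []
  | (w, v) :: ts => (if b && w then pvSp v else v) :: pvPieces w ts

lemma foldA_eq (ts : List (Int × String)) : ∀ (b : Bool) (acc : List String),
    (ts.foldl pvStepA (b, acc)).2 = acc ++ pvPieces b (ts.map pvF) := by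
  induction ts with
  | nil => intro b acc; simp [pvPieces]
  | cons t ts ih =>
    intro b acc
    rw [List.foldl_cons]
    cases hw : pvW t with
    | true =>
      have hstep : pvStepA (b, acc) t
          = (true, acc ++ [if b then pvSp (pvV t) else pvV t]) := by
        simp only [pvW] at hw; simp [pvStepA, hw, pvV]
      rw [hstep, ih]
      cases b <;> simp [pvPieces, pvF, hw]
    | false =>
      have hstep : pvStepA (b, acc) t = (false, acc ++ [pvV t]) := by
        simp only [pvW] at hw; simp [pvStepA, hw, pvV]
      rw [hstep, ih]
      cases b <;> simp [pvPieces, pvF, hw]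

-- ''.join is flatten
lemma cjoin_nil_flatten : ∀ (ps : List (List Char)), PySem.Chars.join [] ps = ps.flatten
  | [] => PySem.Chars.join_nil []
  | [p] => by rw [PySem.Chars.join_singleton]; simp
  | p :: q :: rest => by
      rw [PySem.Chars.join_cons_cons, cjoin_nil_flatten (q :: rest)]; simp

-- ' '.join(v :: vs) = v ++ concatenation of the space-prefixed tail
lemma cjoin_space : ∀ (vs : List (List Char)) (v : List Char),
    PySem.Chars.join [' '] (v :: vs) = v ++ (vs.map (' ' :: ·)).flatten
  | [], v => by rw [PySem.Chars.join_singleton]; simp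
  | q :: rest, v => by
      rw [PySem.Chars.join_cons_cons, cjoin_space rest q]; simp

-- the flag only matters when the head is a word
lemma pieces_flag (l : List (Bool × String)) (b b' : Bool)
    (h : ∀ p ∈ l.head?, p.1 = false) : pvPieces b l = pvPieces b' l := by
  cases l with
  | nil => rfl
  | cons p ts =>
    obtain ⟨w, v⟩ := p
    have : w = false := h (w, v) (by simp)
    subst this
    simp [pvPieces]

-- inside a run of words, every piece is space-prefixed
lemma pieces_run (rest : List (Bool × String)) :
    pvPieces true rest
      = (rest.takeWhile (·.1)).map (fun p => pvSp p.2)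
          ++ pvPieces true (rest.dropWhile (·.1)) := by
  induction rest with
  | nil => simp [pvPieces]
  | cons p ts ih =>
    obtain ⟨w, v⟩ := p
    cases w with
    | true => simp [pvPieces, ih]
    | false => simp [pvPieces]

-- B's groups flatten to A's pieces
lemma groupsB_join : ∀ (items : List (Bool × String)),
    ((pvGroupsB items).map String.toList).flatten
      = ((pvPieces false items).map String.toList).flatten := by
  intro items
  induction hn : items.length using Nat.strong_induction_on generalizing items with
  | _ n ih =>
  cases items with
  | nil => simp [pvGroupsB, pvPieces]
  | cons p rest =>
    obtain ⟨w, v⟩ := p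
    cases w with
    | false =>
      rw [pvGroupsB]
      simp only [if_neg (by simp : ¬ (false = true))]
      simp only [List.map_cons, List.flatten_cons, pvPieces, Bool.and_false,
        if_neg (by simp : ¬ (false = true))]
      rw [ih rest.length (by simp [← hn]) rest rfl]
    | true =>
      rw [pvGroupsB, if_pos rfl]
      simp only [List.map_cons, List.flatten_cons]
      rw [PySem.Str.toList_join]
      simp only [List.map_cons]
      rw [show (" ".toList) = ([' '] : List Char) from rfl]
      rw [cjoin_space]
      have hdw : ∀ p ∈ (rest.dropWhile (·.1)).head?, p.1 = false := by
        intro p hp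
        have := List.head?_dropWhile_not (·.1) rest
        cases hh : (rest.dropWhile (·.1)).head? with
        | none => simp [hh] at hp
        | some q => rw [hh] at this hp; simp at hp; subst hp; exact this
      have hrec := ih (rest.dropWhile (·.1)).length
        (by
          have := List.length_dropWhile_le (·.1) rest
          simp [← hn]; omega)
        (rest.dropWhile (·.1)) rfl
      simp only [pvPieces, Bool.false_and, if_neg (by simp : ¬ (false = true))]
      rw [pieces_run rest, pieces_flag (rest.dropWhile (·.1)) true false hdw]
      simp only [List.map_append, List.flatten_append, List.map_cons, List.flatten_cons]
      rw [hrec]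
      simp only [List.map_map, List.map_map]
      have hmap : ((rest.takeWhile (·.1)).map ((fun s => s.toList) ∘ fun p => pvSp p.2))
          = (((rest.takeWhile (·.1)).map (·.2)).map String.toList).map (' ' :: ·) := by
        simp [Function.comp, pvSp, String.toList_ofList]
      rw [hmap]
      simp [List.append_assoc]

-- ===== VERDICT =====
theorem untokenize_py_spec : Claim_equal_untokenize_py := by
  intro tokens _
  show untokenize_py tokens = untokenize_py_alt tokens
  unfold untokenize_py untokenize_py_alt
  rw [← stepA_def]
  rw [show (fun (t : Int × String) => (t.1 == 1 || t.1 == 2, PySem.Str.strip t.2)) = pvF from rfl]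
  rw [← String.toList_inj]
  rw [PySem.Str.toList_join, PySem.Str.toList_join]
  rw [show ("".toList) = ([] : List Char) from rfl]
  rw [cjoin_nil_flatten, cjoin_nil_flatten]
  rw [foldA_eq tokens false []]
  rw [groupsB_join]
  simp
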